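-- pv_equiv track=rewrite | github.com/dariussattari/Video-Compression | tokenizer.py | decode_6mer
-- ===== SOURCE A (Python) =====
-- def decode_6mer(token):
--     int_to_base = {0:'A', 1:'T', 2:'G', 3:'C'}
--
--     six_mer = []
--
--     dividend = token
--     divisor = 4
--
--     for i in range(6):
--         remainder = dividend % divisor
--         six_mer.append(int_to_base[remainder])
--
--         quotient = dividend // divisor
--         dividend = quotient
--
--     six_mer.reverse()
--
--     return ''.join(six_mer)
-- ===== SOURCE B (Python) =====
-- def decode_6mer(token):
--     int_to_base = 'ATGC'
--     return ''.join(int_to_base[(token // 4 ** (5 - i)) % 4] for i in range(6))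
-- ===== Notes on version B (the rewrite author's own statement) =====
-- stated objective: simpler
-- what changed: Each character is computed statelessly from its positional weight, floor-dividing the token by the appropriate power of four and taking the digit mod four most-significant-first, replacing A's running-dividend remainder loop, list append and final reverse.
import Mathlib
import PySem

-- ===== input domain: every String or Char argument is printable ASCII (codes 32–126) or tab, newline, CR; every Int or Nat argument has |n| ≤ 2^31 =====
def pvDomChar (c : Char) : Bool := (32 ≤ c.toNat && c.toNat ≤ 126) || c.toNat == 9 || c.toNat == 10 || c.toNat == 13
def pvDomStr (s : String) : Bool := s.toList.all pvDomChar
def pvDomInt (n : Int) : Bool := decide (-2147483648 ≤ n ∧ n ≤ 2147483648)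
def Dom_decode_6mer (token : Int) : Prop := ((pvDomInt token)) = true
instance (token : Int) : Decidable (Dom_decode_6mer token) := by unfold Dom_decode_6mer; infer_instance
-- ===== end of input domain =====

-- ===== PORT A =====
-- A: running dividend; each step takes the remainder mod 4, maps it through the digit
-- dict, appends, and floor-divides; the collected list is reversed and joined.
-- The dict lookup int_to_base[remainder] can never miss (remainder = dividend % 4 ∈ {0,1,2,3}),
-- so the KeyError branch is unreachable; '.getD ' ' ' only discharges the Option.
def decode_6mer (token : Int) : String :=
  let int_to_base : PySem.Dict Int Char :=
    ((((PySem.Dict.empty.insert 0 'A').insert 1 'T').insert 2 'G').insert 3 'C')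
  let st := (PySem.List.pyRange 0 6 1).foldl
    (fun (st : List Char × Int) _ =>
      let dividend := st.2
      let remainder := PySem.Int.mod dividend 4
      let six_mer := st.1 ++ [(int_to_base.get? remainder).getD ' ']
      let quotient := PySem.Int.floordiv dividend 4
      (six_mer, quotient))
    ([], token)
  String.ofList st.1.reverse

-- ===== PORT B =====
-- B: stateless — character i is 'ATGC'[(token // 4**(5-i)) % 4], most-significant-first.
-- The string index (token // 4**(5-i)) % 4 ∈ {0,1,2,3} is always in range, so pyGet?
-- never returns none; '.getD ' ' ' only discharges the Option. i ∈ 0..5, so (5-i).toNat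
-- is exact for 4 ** (5 - i).
def decode_6mer_alt (token : Int) : String :=
  String.ofList ((PySem.List.pyRange 0 6 1).map (fun i =>
    (PySem.Str.pyGet? "ATGC"
      (PySem.Int.mod (PySem.Int.floordiv token ((4:Int) ^ (5 - i).toNat)) 4)).getD ' '))

-- ===== PRECONDITION & SPEC =====
def Spec_decode_6mer (token : Int) (out : String) : Prop := out = decode_6mer_alt token
instance (token : Int) (out : String) : Decidable (Spec_decode_6mer token out) := by unfold Spec_decode_6mer; infer_instance

-- ===== CLAIM (what is proved, stated in full; the proofs are below) =====
def Claim_equal_decode_6mer : Prop := ∀ (token : Int), Dom_decode_6mer token → Spec_decode_6mer token (decode_6mer token)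

-- ===== LEMMAS AND PROOFS =====

-- the two digit-to-letter lookups agree on every value an (emod 4) can produce
theorem lookup_eq (x : Int) :
    (((((PySem.Dict.empty.insert 0 'A').insert 1 'T').insert 2 'G').insert 3 'C' :
        PySem.Dict Int Char).get? (x % 4)).getD ' '
      = (PySem.List.pyGet? "ATGC".toList (x % 4)).getD ' ' := by
  have h0 : 0 ≤ x % 4 := Int.emod_nonneg x (by norm_num)
  have h4 : x % 4 < 4 := Int.emod_lt_of_pos x (by norm_num)
  interval_cases (x % 4) <;> decide

-- iterated floor-division by 4 is floor-division by the accumulated power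
theorem fd_step (a : Int) (k : Nat) :
    PySem.Int.floordiv (PySem.Int.floordiv a ((4:Int) ^ k)) 4
      = PySem.Int.floordiv a ((4:Int) ^ (k + 1)) := by
  rw [PySem.Int.floordiv_eq_ediv_of_pos (a := a) (by positivity),
      PySem.Int.floordiv_eq_ediv_of_pos (by omega),
      PySem.Int.floordiv_eq_ediv_of_pos (by positivity),
      Int.ediv_ediv_of_nonneg (by positivity), pow_succ]

-- ===== VERDICT (by name: the statement is the Claim_ definition above) =====
theorem decode_6mer_spec : Claim_equal_decode_6mer := by
  intro token _
  unfold Spec_decode_6mer decode_6mer decode_6mer_alt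
  have h0 : PySem.Int.floordiv token ((4:Int) ^ 0) = token := by
    rw [PySem.Int.floordiv_eq_ediv_of_pos (by norm_num)]; simp
  have e : PySem.List.pyRange 0 6 1 = [0, 1, 2, 3, 4, 5] := by decide
  simp only [e, List.foldl, List.map, List.nil_append, List.cons_append,
    List.reverse_cons, List.reverse_nil]
  rw [show ((5:Int) - 0).toNat = 5 by decide, show ((5:Int) - 1).toNat = 4 by decide,
      show ((5:Int) - 2).toNat = 3 by decide, show ((5:Int) - 3).toNat = 2 by decide,
      show ((5:Int) - 4).toNat = 1 by decide, show ((5:Int) - 5).toNat = 0 by decide]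
  conv_lhs => rw [← h0, fd_step, fd_step, fd_step, fd_step, fd_step]
  norm_num [lookup_eq]
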